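-- pv_equiv track=rewrite | github.com/Cloutiere/CodeToText | analysis_profiles.py | generate_consolidated_files
-- ===== SOURCE A (Python) =====
-- from collections.abc import Iterable
--
-- def generate_consolidated_files(
--     categorized_files: list[tuple[str, set[str]]]
-- ) -> dict[str, str]:
--     def join_blocks(blocks: Iterable[str]) -> str:
--         return "\n\n".join(blocks)
--
--     taches_parts = [b for b, c in categorized_files if "TACHES" in c]
--     fin_global_parts = [b for b, c in categorized_files if "FIN_GLOBAL" in c]
--     fin_sportif_parts = [b for b, c in categorized_files if "FIN_SPORTIF" in c]
--
--     config_doc_parts = [b for b, c in categorized_files if "CONFIG_DOC" in c]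
--     backend_core_parts = [b for b, c in categorized_files if "BACKEND_CORE" in c]
--     backend_config_parts = [b for b, c in categorized_files if "BACKEND_CONFIG" in c]
--     # CORRECTION CRITIQUE : Syntaxe invalide corrigée (espace manquant)
--     backend_util_parts = [b for b, c in categorized_files if "BACKEND_UTIL" in c]
--     frontend_code_parts = [b for b, c in categorized_files if "FRONTEND_CODE" in c]
--     # CORRECTION CRITIQUE : Syntaxe invalide corrigée (espace manquant)
--     frontend_static_parts = [b for b, c in categorized_files if "FRONTEND_STATIC" in c]
--     frontend_config_parts = [b for b, c in categorized_files if "FRONTEND_CONFIG" in c]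
--     # CORRECTION CRITIQUE : Syntaxe invalide corrigée (espace manquant)
--     tests_parts = [b for b, c in categorized_files if "TESTS" in c]
--     # CORRECTION CRITIQUE : Syntaxe invalide corrigée (espace manquant)
--     other_parts = [b for b, c in categorized_files if "OTHER" in c]
--
--     output_files: dict[str, str] = {}
--
--     output_files["__code_admin_scolaire_taches.txt"] = join_blocks(taches_parts)
--     output_files["__code_admin_scolaire_fin_global.txt"] = join_blocks(fin_global_parts)
--     output_files["__code_admin_scolaire_fin_sportif.txt"] = join_blocks(fin_sportif_parts)
--
--     output_files["__code_admin_scolaire_config_docs.txt"] = join_blocks(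
--         config_doc_parts + backend_core_parts + backend_config_parts +
--         backend_util_parts + frontend_code_parts + frontend_static_parts +
--         frontend_config_parts
--     )
--
--     if tests_parts:
--         output_files["__code_admin_scolaire_tests.txt"] = join_blocks(tests_parts)
--     if other_parts:
--         output_files["__code_admin_scolaire_other.txt"] = join_blocks(other_parts)
--
--     return output_files
-- ===== SOURCE B (Python) =====
-- PRIORITY = {
--     "TACHES": 0, "FIN_GLOBAL": 1, "FIN_SPORTIF": 2,
--     "CONFIG_DOC": 3, "BACKEND_CORE": 4, "BACKEND_CONFIG": 5,
--     "BACKEND_UTIL": 6, "FRONTEND_CODE": 7, "FRONTEND_STATIC": 8,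
--     "FRONTEND_CONFIG": 9, "TESTS": 10, "OTHER": 11,
-- }
--
-- _SPECS = [
--     ("__code_admin_scolaire_taches.txt", 0, True),
--     ("__code_admin_scolaire_fin_global.txt", 1, True),
--     ("__code_admin_scolaire_fin_sportif.txt", 2, True),
--     ("__code_admin_scolaire_config_docs.txt", 9, True),
--     ("__code_admin_scolaire_tests.txt", 10, False),
--     ("__code_admin_scolaire_other.txt", 11, False),
-- ]
--
-- def generate_consolidated_files(categorized_files):
--     # Expand every block into (priority, block) tags, stable-sort by priority,
--     # then consume the sorted list left to right, one contiguous run per output file.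
--     tagged = sorted(
--         ((PRIORITY[t], b)
--          for b, c in categorized_files
--          for t in set(c) if t in PRIORITY),
--         key=lambda e: e[0])
--     out = {}
--     i = 0
--     for name, hi, always in _SPECS:
--         j = i
--         while j < len(tagged) and tagged[j][0] <= hi:
--             j += 1
--         if always or j > i:
--             out[name] = "\n\n".join(b for _, b in tagged[i:j])
--         i = j
--     return out
-- ===== Notes on version B (the rewrite author's own statement) =====
-- stated objective: alternative
-- what changed: Replaces A's twelve independent filtering passes with a tag-expand / stable-sort-by-priority / single consuming scan algorithm: each block is expanded into (priority, block) pairs, the pairs are stably sorted by priority, and every output file is one contiguous run of the sorted list.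
import Mathlib
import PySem

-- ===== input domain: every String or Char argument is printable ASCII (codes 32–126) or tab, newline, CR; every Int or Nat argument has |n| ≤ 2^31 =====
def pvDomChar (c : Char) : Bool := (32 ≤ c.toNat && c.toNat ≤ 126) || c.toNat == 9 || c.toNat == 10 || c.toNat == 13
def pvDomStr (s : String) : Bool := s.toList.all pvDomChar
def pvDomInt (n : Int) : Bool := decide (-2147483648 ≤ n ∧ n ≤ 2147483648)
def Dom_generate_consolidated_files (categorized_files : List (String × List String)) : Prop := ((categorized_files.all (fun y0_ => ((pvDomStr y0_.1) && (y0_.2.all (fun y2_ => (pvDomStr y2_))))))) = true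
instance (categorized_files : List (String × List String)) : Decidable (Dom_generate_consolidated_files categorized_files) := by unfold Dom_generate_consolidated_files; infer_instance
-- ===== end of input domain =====

-- B replaces A's twelve filtering passes by a different algorithm: tag-expand each block with an
-- integer category priority, stable-sort the tags by priority, and emit each output file from one
-- contiguous run of the sorted list (objective: alternative; not claimed faster).


-- ===== PORT A =====
-- join_blocks: "\n\n".join(blocks)
def gcfJoin (blocks : List String) : String := PySem.Str.join "\n\n" blocks

-- [b for b, c in categorized_files if k in c]  (one comprehension of A, parameterised by the literal k)
def gcfComp (k : String) (cf : List (String × List String)) : List String :=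
  (cf.filter (fun p => k ∈ p.2)).map (·.1)

def generate_consolidated_files (categorized_files : List (String × List String)) : List (String × String) :=
  let taches_parts := gcfComp "TACHES" categorized_files
  let fin_global_parts := gcfComp "FIN_GLOBAL" categorized_files
  let fin_sportif_parts := gcfComp "FIN_SPORTIF" categorized_files
  let config_doc_parts := gcfComp "CONFIG_DOC" categorized_files
  let backend_core_parts := gcfComp "BACKEND_CORE" categorized_files
  let backend_config_parts := gcfComp "BACKEND_CONFIG" categorized_files
  let backend_util_parts := gcfComp "BACKEND_UTIL" categorized_files
  let frontend_code_parts := gcfComp "FRONTEND_CODE" categorized_files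
  let frontend_static_parts := gcfComp "FRONTEND_STATIC" categorized_files
  let frontend_config_parts := gcfComp "FRONTEND_CONFIG" categorized_files
  let tests_parts := gcfComp "TESTS" categorized_files
  let other_parts := gcfComp "OTHER" categorized_files
  let out0 : List (String × String) :=
    [("__code_admin_scolaire_taches.txt", gcfJoin taches_parts),
     ("__code_admin_scolaire_fin_global.txt", gcfJoin fin_global_parts),
     ("__code_admin_scolaire_fin_sportif.txt", gcfJoin fin_sportif_parts),
     ("__code_admin_scolaire_config_docs.txt", gcfJoin
        (config_doc_parts ++ backend_core_parts ++ backend_config_parts ++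
         backend_util_parts ++ frontend_code_parts ++ frontend_static_parts ++
         frontend_config_parts))]
  let out1 := if tests_parts.isEmpty then out0
              else out0 ++ [("__code_admin_scolaire_tests.txt", gcfJoin tests_parts)]
  if other_parts.isEmpty then out1
  else out1 ++ [("__code_admin_scolaire_other.txt", gcfJoin other_parts)]

-- ===== PORT B =====
-- PRIORITY: the category → priority dict of Source B
def gcfPriority : PySem.Dict String Int :=
  ⟨[("TACHES", 0), ("FIN_GLOBAL", 1), ("FIN_SPORTIF", 2), ("CONFIG_DOC", 3),
   ("BACKEND_CORE", 4), ("BACKEND_CONFIG", 5), ("BACKEND_UTIL", 6),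
   ("FRONTEND_CODE", 7), ("FRONTEND_STATIC", 8), ("FRONTEND_CONFIG", 9),
   ("TESTS", 10), ("OTHER", 11)]⟩

-- _SPECS: (output file name, highest priority it consumes, emit even when empty)
def gcfSpecs : List (String × Int × Bool) :=
  [("__code_admin_scolaire_taches.txt", 0, true),
   ("__code_admin_scolaire_fin_global.txt", 1, true),
   ("__code_admin_scolaire_fin_sportif.txt", 2, true),
   ("__code_admin_scolaire_config_docs.txt", 9, true),
   ("__code_admin_scolaire_tests.txt", 10, false),
   ("__code_admin_scolaire_other.txt", 11, false)]

-- the generator: (PRIORITY[t], b) for b, c in categorized_files for t in set(c) if t in PRIORITY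
def gcfTag (p : String × List String) : List (Int × String) :=
  (PySem.Set.ofList p.2).filterMap
    (fun t => (PySem.Dict.get? gcfPriority t).map (fun k => (k, p.1)))

-- while j < len(tagged) and tagged[j][0] <= hi: j += 1
def gcfAdvance (tagged : List (Int × String)) (hi : Int) (j : Nat) : Nat :=
  if h : j < tagged.length then
    if tagged[j].1 ≤ hi then gcfAdvance tagged hi (j + 1) else j
  else j
termination_by tagged.length - j

-- the for-loop over _SPECS with state (i, out)
def gcfLoop (tagged : List (Int × String)) :
    List (String × Int × Bool) → Nat → List (String × String) → List (String × String)
  | [], _, out => out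
  | (name, hi, always) :: rest, i, out =>
    let j := gcfAdvance tagged hi i
    let out' := if always || decide (i < j) then
        out ++ [(name,
          PySem.Str.join "\n\n"
            ((PySem.List.slice tagged (some (i : Int)) (some (j : Int))).map (·.2)))]
      else out
    gcfLoop tagged rest j out'

def generate_consolidated_files_alt (categorized_files : List (String × List String)) : List (String × String) :=
  let tagged := PySem.List.sorted (categorized_files.flatMap gcfTag) (fun e => e.1) false
  gcfLoop tagged gcfSpecs 0 []

-- ===== PRECONDITION & SPEC =====
def Spec_generate_consolidated_files (categorized_files : List (String × List String)) (out : List (String × String)) : Prop := out = generate_consolidated_files_alt categorized_files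
instance (categorized_files : List (String × List String)) (out : List (String × String)) : Decidable (Spec_generate_consolidated_files categorized_files out) := by unfold Spec_generate_consolidated_files; infer_instance

-- ===== CLAIM (what is proved, stated in full; the proofs are below) =====
def Claim_equal_generate_consolidated_files : Prop := ∀ (categorized_files : List (String × List String)), Dom_generate_consolidated_files categorized_files → Spec_generate_consolidated_files categorized_files (generate_consolidated_files categorized_files)

-- ===== LEMMAS AND PROOFS =====

-- category name of each priority 0..11
def gcfCat : Nat → String
  | 0 => "TACHES" | 1 => "FIN_GLOBAL" | 2 => "FIN_SPORTIF" | 3 => "CONFIG_DOC"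
  | 4 => "BACKEND_CORE" | 5 => "BACKEND_CONFIG" | 6 => "BACKEND_UTIL"
  | 7 => "FRONTEND_CODE" | 8 => "FRONTEND_STATIC" | 9 => "FRONTEND_CONFIG"
  | 10 => "TESTS" | _ => "OTHER"

-- group k: A's comprehension for category k, tagged with priority k
def gcfG (k : Nat) (cf : List (String × List String)) : List (Int × String) :=
  (gcfComp (gcfCat k) cf).map (fun b => ((k : Int), b))

-- the stable-sorted arrangement: groups 0..11 in order
def gcfGrouped (l : List (Int × String)) : List (Int × String) :=
  (List.range 12).flatMap (fun (k : Nat) => l.filter (fun e => decide (e.1 = ((k : Nat) : Int))))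

theorem gcf_not_mem_none (t : String) (hmem : ¬ t ∈ gcfPriority.keys) :
    PySem.Dict.get? gcfPriority t = none := by
  rw [PySem.Dict.get?_eq_none_iff_not_mem_keys]; exact hmem

theorem gcf_get?_eq_some_iff (t : String) (k : Nat) (hk : k < 12) :
    PySem.Dict.get? gcfPriority t = some ((k : Nat) : Int) ↔ t = gcfCat k := by
  by_cases hmem : t ∈ gcfPriority.keys
  · simp only [gcfPriority, PySem.Dict.keys_mk, List.map_cons, List.map_nil, List.mem_cons,
      List.not_mem_nil, or_false] at hmem
    rcases hmem with rfl|rfl|rfl|rfl|rfl|rfl|rfl|rfl|rfl|rfl|rfl|rfl <;>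
      interval_cases k <;> simp_all <;> decide
  · refine iff_of_false (fun h => ?_) (fun heq => hmem ?_)
    · rw [gcf_not_mem_none t hmem] at h; cases h
    · subst heq; interval_cases k <;> decide

theorem gcf_keys_bound (e : Int × String) (p : String × List String)
    (he : e ∈ gcfTag p) : ∃ m : Nat, m < 12 ∧ e.1 = (m : Int) := by
  simp only [gcfTag, List.mem_filterMap, Option.map_eq_some_iff] at he
  obtain ⟨t, _, v, hv, rfl⟩ := he
  by_cases hmem : t ∈ gcfPriority.keys
  · simp only [gcfPriority, PySem.Dict.keys_mk, List.map_cons, List.map_nil, List.mem_cons,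
      List.not_mem_nil, or_false] at hmem
    rcases hmem with rfl|rfl|rfl|rfl|rfl|rfl|rfl|rfl|rfl|rfl|rfl|rfl
    · exact ⟨0, by omega, Option.some.inj (hv.symm.trans ((gcf_get?_eq_some_iff _ 0 (by omega)).mpr rfl))⟩
    · exact ⟨1, by omega, Option.some.inj (hv.symm.trans ((gcf_get?_eq_some_iff _ 1 (by omega)).mpr rfl))⟩
    · exact ⟨2, by omega, Option.some.inj (hv.symm.trans ((gcf_get?_eq_some_iff _ 2 (by omega)).mpr rfl))⟩
    · exact ⟨3, by omega, Option.some.inj (hv.symm.trans ((gcf_get?_eq_some_iff _ 3 (by omega)).mpr rfl))⟩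
    · exact ⟨4, by omega, Option.some.inj (hv.symm.trans ((gcf_get?_eq_some_iff _ 4 (by omega)).mpr rfl))⟩
    · exact ⟨5, by omega, Option.some.inj (hv.symm.trans ((gcf_get?_eq_some_iff _ 5 (by omega)).mpr rfl))⟩
    · exact ⟨6, by omega, Option.some.inj (hv.symm.trans ((gcf_get?_eq_some_iff _ 6 (by omega)).mpr rfl))⟩
    · exact ⟨7, by omega, Option.some.inj (hv.symm.trans ((gcf_get?_eq_some_iff _ 7 (by omega)).mpr rfl))⟩
    · exact ⟨8, by omega, Option.some.inj (hv.symm.trans ((gcf_get?_eq_some_iff _ 8 (by omega)).mpr rfl))⟩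
    · exact ⟨9, by omega, Option.some.inj (hv.symm.trans ((gcf_get?_eq_some_iff _ 9 (by omega)).mpr rfl))⟩
    · exact ⟨10, by omega, Option.some.inj (hv.symm.trans ((gcf_get?_eq_some_iff _ 10 (by omega)).mpr rfl))⟩
    · exact ⟨11, by omega, Option.some.inj (hv.symm.trans ((gcf_get?_eq_some_iff _ 11 (by omega)).mpr rfl))⟩
  · rw [gcf_not_mem_none t hmem] at hv; cases hv

theorem gcf_insertBy_append (before : Int × String → Int × String → Bool)
    (x : Int × String) (l1 l2 : List (Int × String))
    (h : ∀ y ∈ l1, before x y = false) :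
    PySem.List.insertBy before x (l1 ++ l2) = l1 ++ PySem.List.insertBy before x l2 := by
  induction l1 with
  | nil => simp
  | cons y ys ih =>
    have hy := h y (by simp)
    simp only [List.cons_append, PySem.List.insertBy, hy]
    simp [ih (fun z hz => h z (by simp [hz]))]

theorem gcf_insertBy_head (before : Int × String → Int × String → Bool)
    (x : Int × String) (l : List (Int × String))
    (h : ∀ y ∈ l, before x y = true) :
    PySem.List.insertBy before x l = x :: l := by
  cases l with
  | nil => simp [PySem.List.insertBy]
  | cons y ys => simp [PySem.List.insertBy, h y (by simp)]

theorem gcf_mem_filter_key (l : List (Int × String)) (k : Nat) (y : Int × String)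
    (hy : y ∈ l.filter (fun e => decide (e.1 = (k : Int)))) : y.1 = (k : Int) := by
  simp only [List.mem_filter, decide_eq_true_eq] at hy
  exact hy.2

theorem gcf_flatMap_congr {α : Type} (L : List α) (f g : α → List (Int × String))
    (h : ∀ a ∈ L, f a = g a) : L.flatMap f = L.flatMap g := by
  induction L with
  | nil => rfl
  | cons a L ih => simp only [List.flatMap_cons, h a (by simp), ih (fun b hb => h b (by simp [hb]))]

theorem gcf_insert_grouped (l : List (Int × String)) (x : Int × String)
    (m : Nat) (hm : m < 12) (hx : x.1 = (m : Int)) :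
    PySem.List.insertBy (fun a b => decide (a.1 < b.1)) x (gcfGrouped l)
      = gcfGrouped (l ++ [x]) := by
  have hxne : ∀ k : Nat, k ≠ m →
      (l ++ [x]).filter (fun e => decide (e.1 = ((k : Nat) : Int)))
        = l.filter (fun e => decide (e.1 = ((k : Nat) : Int))) := by
    intro k hk
    simp only [List.filter_append, List.filter_cons, List.filter_nil, hx, decide_eq_true_eq,
      Nat.cast_inj]
    rw [if_neg (by omega)]
    simp
  have hsplit : (12 : Nat) = (m + 1) + (11 - m) := by omega
  unfold gcfGrouped
  rw [hsplit, List.range_add, List.flatMap_append, List.flatMap_append]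
  rw [gcf_insertBy_append _ _ _ _ ?hpre]
  case hpre =>
    intro y hy
    simp only [List.mem_flatMap, List.mem_range] at hy
    obtain ⟨k, hkm, hyk⟩ := hy
    have hk := gcf_mem_filter_key l k y hyk
    simp only [decide_eq_false_iff_not, hx, hk, not_lt]
    exact_mod_cast Nat.le_of_lt_succ hkm
  rw [gcf_insertBy_head _ _ _ ?hsuf]
  case hsuf =>
    intro y hy
    simp only [List.mem_flatMap, List.mem_map, List.mem_range] at hy
    obtain ⟨k, ⟨i, hi, rfl⟩, hyk⟩ := hy
    have hk := gcf_mem_filter_key l (m + 1 + i) y hyk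
    simp only [decide_eq_true_eq, hx, hk]
    exact_mod_cast by omega
  -- suffix groups unchanged by appending x
  have hsuf_eq : ((List.range (11 - m)).map (fun k => m + 1 + k)).flatMap
      (fun (k : Nat) => (l ++ [x]).filter (fun e => decide (e.1 = ((k : Nat) : Int))))
      = ((List.range (11 - m)).map (fun k => m + 1 + k)).flatMap
          (fun (k : Nat) => l.filter (fun e => decide (e.1 = ((k : Nat) : Int)))) := by
    apply gcf_flatMap_congr
    intro a ha
    simp only [List.mem_map, List.mem_range] at ha
    obtain ⟨i, hi, rfl⟩ := ha
    exact hxne _ (by omega)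
  -- prefix groups: x lands at the end of group m, the last one of the prefix
  have hpre_eq : (List.range (m + 1)).flatMap
      (fun (k : Nat) => (l ++ [x]).filter (fun e => decide (e.1 = ((k : Nat) : Int))))
      = (List.range (m + 1)).flatMap
          (fun (k : Nat) => l.filter (fun e => decide (e.1 = ((k : Nat) : Int)))) ++ [x] := by
    rw [List.range_succ, List.flatMap_append, List.flatMap_append]
    rw [gcf_flatMap_congr (List.range m) _ _ (fun a ha => hxne a (by simp at ha; omega))]
    simp [List.filter_append, hx, List.append_assoc]
  rw [hsuf_eq, hpre_eq]
  simp [List.append_assoc]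

theorem gcf_fold_grouped (l : List (Int × String))
    (hb : ∀ e ∈ l, ∃ m : Nat, m < 12 ∧ e.1 = (m : Int)) :
    l.foldl (fun acc x => PySem.List.insertBy (fun a b => decide (a.1 < b.1)) x acc) []
      = gcfGrouped l := by
  induction l using List.reverseRecOn with
  | nil => simp [gcfGrouped]
  | append_singleton l x ih =>
    rw [List.foldl_append, List.foldl_cons, List.foldl_nil]
    rw [ih (fun e he => hb e (by simp [he]))]
    obtain ⟨m, hm, hx⟩ := hb x (by simp)
    exact gcf_insert_grouped l x m hm hx

theorem gcf_sorted_eq (cf : List (String × List String)) :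
    PySem.List.sorted (cf.flatMap gcfTag) (fun e => e.1) false
      = gcfGrouped (cf.flatMap gcfTag) := by
  rw [PySem.List.sorted_eq_foldl_insertBy]
  apply gcf_fold_grouped
  intro e he
  simp only [List.mem_flatMap] at he
  obtain ⟨p, _, hp⟩ := he
  exact gcf_keys_bound e p hp

theorem gcf_filterMap_nodup (c : List String) (hnd : c.Nodup) (b : String)
    (k : Nat) (hk : k < 12) :
    ((c.filterMap (fun t => (PySem.Dict.get? gcfPriority t).map (fun v => (v, b)))).filter
        (fun e => decide (e.1 = (k : Int))))
      = if gcfCat k ∈ c then [((k : Int), b)] else [] := by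
  induction c with
  | nil => simp
  | cons t c ih =>
    rcases List.nodup_cons.mp hnd with ⟨htc, hndc⟩
    by_cases ht : t = gcfCat k
    · subst ht
      have hg : PySem.Dict.get? gcfPriority (gcfCat k) = some ((k : Nat) : Int) :=
        (gcf_get?_eq_some_iff _ k hk).mpr rfl
      simp [List.filterMap_cons, hg, ih hndc, htc]
    · have hmem : (gcfCat k ∈ t :: c) ↔ (gcfCat k ∈ c) := by
        simp [List.mem_cons, Ne.symm ht]
      cases hv : PySem.Dict.get? gcfPriority t with
      | none => simp [List.filterMap_cons, hv, ih hndc, hmem]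
      | some v =>
        have hvk : ¬ v = ((k : Nat) : Int) := fun h =>
          ht ((gcf_get?_eq_some_iff t k hk).mp (by rw [hv, h]))
        simp [List.filterMap_cons, hv, ih hndc, hmem, hvk]

theorem gcf_tag_filter (p : String × List String) (k : Nat) (hk : k < 12) :
    (gcfTag p).filter (fun e => decide (e.1 = (k : Int)))
      = if gcfCat k ∈ p.2 then [((k : Int), p.1)] else [] := by
  unfold gcfTag
  rw [gcf_filterMap_nodup _ (PySem.Set.nodup_ofList _) _ k hk]
  simp [PySem.Set.mem_ofList]

theorem gcf_group_filter (cf : List (String × List String)) (k : Nat) (hk : k < 12) :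
    (cf.flatMap gcfTag).filter (fun e => decide (e.1 = (k : Int))) = gcfG k cf := by
  induction cf with
  | nil => simp [gcfG, gcfComp]
  | cons p cf ih =>
    rw [List.flatMap_cons, List.filter_append, ih, gcf_tag_filter p k hk]
    by_cases h : gcfCat k ∈ p.2 <;> simp [gcfG, gcfComp, h]

theorem gcf_key_G (k : Nat) (cf : List (String × List String)) (y : Int × String)
    (hy : y ∈ gcfG k cf) : y.1 = (k : Int) := by
  simp only [gcfG, List.mem_map] at hy
  obtain ⟨b, _, rfl⟩ := hy
  rfl

theorem gcf_grouped_explicit (cf : List (String × List String)) :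
    gcfGrouped (cf.flatMap gcfTag)
      = gcfG 0 cf ++ (gcfG 1 cf ++ (gcfG 2 cf ++ (gcfG 3 cf ++ (gcfG 4 cf ++
        (gcfG 5 cf ++ (gcfG 6 cf ++ (gcfG 7 cf ++ (gcfG 8 cf ++ (gcfG 9 cf ++
        (gcfG 10 cf ++ gcfG 11 cf)))))))))) := by
  have h12 : List.range 12 = [0,1,2,3,4,5,6,7,8,9,10,11] := by decide
  unfold gcfGrouped
  rw [h12]
  simp only [List.flatMap_cons, List.flatMap_nil, List.append_nil]
  rw [gcf_group_filter cf 0 (by omega), gcf_group_filter cf 1 (by omega),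
      gcf_group_filter cf 2 (by omega), gcf_group_filter cf 3 (by omega),
      gcf_group_filter cf 4 (by omega), gcf_group_filter cf 5 (by omega),
      gcf_group_filter cf 6 (by omega), gcf_group_filter cf 7 (by omega),
      gcf_group_filter cf 8 (by omega), gcf_group_filter cf 9 (by omega),
      gcf_group_filter cf 10 (by omega), gcf_group_filter cf 11 (by omega)]

theorem gcf_advance_spec (tagged P L R : List (Int × String)) (hi : Int) (i : Nat)
    (htag : tagged = P ++ (L ++ R)) (hiEq : i = P.length)
    (hL : ∀ y ∈ L, y.1 ≤ hi) (hR : ∀ y ∈ R, hi < y.1) :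
    gcfAdvance tagged hi i = P.length + L.length := by
  induction L generalizing P i with
  | nil =>
    subst htag hiEq
    rw [gcfAdvance]
    cases R with
    | nil => simp
    | cons r R' =>
      have hlen : P.length < (P ++ ([] ++ r :: R')).length := by simp
      have hel : (P ++ ([] ++ r :: R'))[P.length]'hlen = r := by
        simp [List.getElem_append_right (by omega : P.length ≤ P.length)]
      rw [dif_pos hlen, hel, if_neg (by exact not_le.mpr (hR r (by simp)))]
      simp
  | cons y L' ih =>
    subst htag hiEq
    have hlen : P.length < (P ++ (y :: L' ++ R)).length := by simp
    have hel : (P ++ (y :: L' ++ R))[P.length]'hlen = y := by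
      simp [List.getElem_append_right (by omega : P.length ≤ P.length)]
    rw [gcfAdvance, dif_pos hlen, hel, if_pos (hL y (by simp))]
    have := ih (P ++ [y]) (P.length + 1)
      (by simp [List.append_assoc]) (by simp)
      (fun z hz => hL z (by simp [hz]))
    rw [this]
    simp only [List.length_append, List.length_cons, List.length_nil]
    omega

theorem gcf_slice_spec (tagged P L R : List (Int × String)) (i j : Nat)
    (htag : tagged = P ++ (L ++ R)) (hiEq : i = P.length) (hjEq : j = P.length + L.length) :
    PySem.List.slice tagged (some (i : Int)) (some (j : Int)) = L := by
  subst htag hiEq hjEq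
  have : ((P.length + L.length : Nat) : Int) = (P.length : Int) + (L.length : Int) := by
    push_cast; ring
  rw [this, PySem.List.slice_natCast_add, List.drop_left, List.take_left]

theorem gcf_loop_eval (g0 g1 g2 g3 g4 g5 g6 g7 g8 g9 g10 g11 : List (Int × String))
    (h0 : ∀ y ∈ g0, y.1 = ((0 : Nat) : Int)) (h1 : ∀ y ∈ g1, y.1 = ((1 : Nat) : Int))
    (h2 : ∀ y ∈ g2, y.1 = ((2 : Nat) : Int)) (h3 : ∀ y ∈ g3, y.1 = ((3 : Nat) : Int))
    (h4 : ∀ y ∈ g4, y.1 = ((4 : Nat) : Int)) (h5 : ∀ y ∈ g5, y.1 = ((5 : Nat) : Int))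
    (h6 : ∀ y ∈ g6, y.1 = ((6 : Nat) : Int)) (h7 : ∀ y ∈ g7, y.1 = ((7 : Nat) : Int))
    (h8 : ∀ y ∈ g8, y.1 = ((8 : Nat) : Int)) (h9 : ∀ y ∈ g9, y.1 = ((9 : Nat) : Int))
    (h10 : ∀ y ∈ g10, y.1 = ((10 : Nat) : Int)) (h11 : ∀ y ∈ g11, y.1 = ((11 : Nat) : Int)) :
    gcfLoop (g0 ++ (g1 ++ (g2 ++ (g3 ++ (g4 ++ (g5 ++ (g6 ++ (g7 ++ (g8 ++ (g9 ++
        (g10 ++ g11))))))))))) gcfSpecs 0 []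
      = (([("__code_admin_scolaire_taches.txt", PySem.Str.join "\n\n" (g0.map (·.2))),
          ("__code_admin_scolaire_fin_global.txt", PySem.Str.join "\n\n" (g1.map (·.2))),
          ("__code_admin_scolaire_fin_sportif.txt", PySem.Str.join "\n\n" (g2.map (·.2))),
          ("__code_admin_scolaire_config_docs.txt", PySem.Str.join "\n\n"
            ((g3 ++ (g4 ++ (g5 ++ (g6 ++ (g7 ++ (g8 ++ g9)))))).map (·.2)))]
         ++ (if g10.isEmpty then [] else
              [("__code_admin_scolaire_tests.txt", PySem.Str.join "\n\n" (g10.map (·.2)))]))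
         ++ (if g11.isEmpty then [] else
              [("__code_admin_scolaire_other.txt", PySem.Str.join "\n\n" (g11.map (·.2)))])) := by
  set T := g0 ++ (g1 ++ (g2 ++ (g3 ++ (g4 ++ (g5 ++ (g6 ++ (g7 ++ (g8 ++ (g9 ++
      (g10 ++ g11)))))))))) with hT
  -- the six boundary computations of the consuming scan
  have a1 : gcfAdvance T 0 0 = g0.length := by
    have h := gcf_advance_spec T [] g0 (g1 ++ (g2 ++ (g3 ++ (g4 ++ (g5 ++ (g6 ++ (g7 ++
        (g8 ++ (g9 ++ (g10 ++ g11)))))))))) 0 0 (by rw [hT]; simp) (by simp)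
      (fun y hy => le_of_eq (h0 y hy))
      (by intro y hy
          simp only [List.mem_append] at hy
          rcases hy with hy|hy|hy|hy|hy|hy|hy|hy|hy|hy|hy <;>
            first
              | (rw [h1 y hy]; decide) | (rw [h2 y hy]; decide) | (rw [h3 y hy]; decide)
              | (rw [h4 y hy]; decide) | (rw [h5 y hy]; decide) | (rw [h6 y hy]; decide)
              | (rw [h7 y hy]; decide) | (rw [h8 y hy]; decide) | (rw [h9 y hy]; decide)
              | (rw [h10 y hy]; decide) | (rw [h11 y hy]; decide))
    rw [h]; simp
  have a2 : gcfAdvance T 1 g0.length = g0.length + g1.length := by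
    have h := gcf_advance_spec T g0 g1 (g2 ++ (g3 ++ (g4 ++ (g5 ++ (g6 ++ (g7 ++
        (g8 ++ (g9 ++ (g10 ++ g11))))))))) 1 g0.length (by rw [hT]) rfl
      (by intro y hy; rw [h1 y hy]; decide)
      (by intro y hy
          simp only [List.mem_append] at hy
          rcases hy with hy|hy|hy|hy|hy|hy|hy|hy|hy|hy <;>
            first
              | (rw [h2 y hy]; decide) | (rw [h3 y hy]; decide) | (rw [h4 y hy]; decide)
              | (rw [h5 y hy]; decide) | (rw [h6 y hy]; decide) | (rw [h7 y hy]; decide)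
              | (rw [h8 y hy]; decide) | (rw [h9 y hy]; decide) | (rw [h10 y hy]; decide)
              | (rw [h11 y hy]; decide))
    exact h
  have a3 : gcfAdvance T 2 (g0.length + g1.length) = g0.length + g1.length + g2.length := by
    have h := gcf_advance_spec T (g0 ++ g1) g2 (g3 ++ (g4 ++ (g5 ++ (g6 ++ (g7 ++
        (g8 ++ (g9 ++ (g10 ++ g11)))))))) 2 (g0.length + g1.length)
      (by rw [hT]; simp [List.append_assoc]) (by simp only [List.length_append]; try omega)
      (by intro y hy; rw [h2 y hy]; decide)
      (by intro y hy
          simp only [List.mem_append] at hy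
          rcases hy with hy|hy|hy|hy|hy|hy|hy|hy|hy <;>
            first
              | (rw [h3 y hy]; decide) | (rw [h4 y hy]; decide) | (rw [h5 y hy]; decide)
              | (rw [h6 y hy]; decide) | (rw [h7 y hy]; decide) | (rw [h8 y hy]; decide)
              | (rw [h9 y hy]; decide) | (rw [h10 y hy]; decide) | (rw [h11 y hy]; decide))
    rw [h]; simp only [List.length_append]; try omega
  have a4 : gcfAdvance T 9 (g0.length + g1.length + g2.length)
      = g0.length + g1.length + g2.length + (g3.length + g4.length + g5.length + g6.length
        + g7.length + g8.length + g9.length) := by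
    have h := gcf_advance_spec T (g0 ++ (g1 ++ g2)) (g3 ++ (g4 ++ (g5 ++ (g6 ++ (g7 ++
        (g8 ++ g9)))))) (g10 ++ g11) 9 (g0.length + g1.length + g2.length)
      (by rw [hT]; simp [List.append_assoc]) (by simp only [List.length_append]; try omega)
      (by intro y hy
          simp only [List.mem_append] at hy
          rcases hy with hy|hy|hy|hy|hy|hy|hy <;>
            first
              | (rw [h3 y hy]; decide) | (rw [h4 y hy]; decide) | (rw [h5 y hy]; decide)
              | (rw [h6 y hy]; decide) | (rw [h7 y hy]; decide) | (rw [h8 y hy]; decide)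
              | (rw [h9 y hy]; decide))
      (by intro y hy
          simp only [List.mem_append] at hy
          rcases hy with hy|hy <;>
            first
              | (rw [h10 y hy]; decide) | (rw [h11 y hy]; decide))
    rw [h]; simp only [List.length_append]; try omega
  have a5 : gcfAdvance T 10 (g0.length + g1.length + g2.length + (g3.length + g4.length
      + g5.length + g6.length + g7.length + g8.length + g9.length))
      = g0.length + g1.length + g2.length + (g3.length + g4.length + g5.length + g6.length
        + g7.length + g8.length + g9.length) + g10.length := by
    have h := gcf_advance_spec T (g0 ++ (g1 ++ (g2 ++ (g3 ++ (g4 ++ (g5 ++ (g6 ++ (g7 ++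
        (g8 ++ g9))))))))) g10 g11 10
      (g0.length + g1.length + g2.length + (g3.length + g4.length + g5.length + g6.length
        + g7.length + g8.length + g9.length))
      (by rw [hT]; simp [List.append_assoc]) (by simp only [List.length_append]; try omega)
      (by intro y hy; rw [h10 y hy]; decide)
      (by intro y hy; rw [h11 y hy]; decide)
    rw [h]; simp only [List.length_append]; try omega
  have a6 : gcfAdvance T 11 (g0.length + g1.length + g2.length + (g3.length + g4.length
      + g5.length + g6.length + g7.length + g8.length + g9.length) + g10.length)
      = g0.length + g1.length + g2.length + (g3.length + g4.length + g5.length + g6.length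
        + g7.length + g8.length + g9.length) + g10.length + g11.length := by
    have h := gcf_advance_spec T (g0 ++ (g1 ++ (g2 ++ (g3 ++ (g4 ++ (g5 ++ (g6 ++ (g7 ++
        (g8 ++ (g9 ++ g10)))))))))) g11 [] 11
      (g0.length + g1.length + g2.length + (g3.length + g4.length + g5.length + g6.length
        + g7.length + g8.length + g9.length) + g10.length)
      (by rw [hT]; simp [List.append_assoc]) (by simp only [List.length_append]; try omega)
      (by intro y hy; rw [h11 y hy]; decide)
      (by intro y hy; cases hy)
    rw [h]; simp only [List.length_append]; try omega
  -- the four slices that are emitted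
  have s1 : PySem.List.slice T (some ((0 : Nat) : Int)) (some (((g0.length : Nat)) : Int))
      = g0 :=
    gcf_slice_spec T [] g0 (g1 ++ (g2 ++ (g3 ++ (g4 ++ (g5 ++ (g6 ++ (g7 ++ (g8 ++ (g9 ++
      (g10 ++ g11)))))))))) 0 g0.length (by rw [hT]; simp) (by simp) (by simp)
  have s2 : PySem.List.slice T (some ((g0.length : Nat) : Int))
      (some (((g0.length + g1.length : Nat)) : Int)) = g1 :=
    gcf_slice_spec T g0 g1 (g2 ++ (g3 ++ (g4 ++ (g5 ++ (g6 ++ (g7 ++ (g8 ++ (g9 ++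
      (g10 ++ g11))))))))) g0.length (g0.length + g1.length) (by rw [hT]) rfl rfl
  have s3 : PySem.List.slice T (some ((g0.length + g1.length : Nat) : Int))
      (some (((g0.length + g1.length + g2.length : Nat)) : Int)) = g2 :=
    gcf_slice_spec T (g0 ++ g1) g2 (g3 ++ (g4 ++ (g5 ++ (g6 ++ (g7 ++ (g8 ++ (g9 ++
      (g10 ++ g11)))))))) (g0.length + g1.length) (g0.length + g1.length + g2.length)
      (by rw [hT]; simp [List.append_assoc]) (by simp only [List.length_append]; try omega)
      (by simp only [List.length_append]; try omega)
  have s4 : PySem.List.slice T (some ((g0.length + g1.length + g2.length : Nat) : Int))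
      (some (((g0.length + g1.length + g2.length + (g3.length + g4.length + g5.length
        + g6.length + g7.length + g8.length + g9.length) : Nat)) : Int))
      = g3 ++ (g4 ++ (g5 ++ (g6 ++ (g7 ++ (g8 ++ g9))))) :=
    gcf_slice_spec T (g0 ++ (g1 ++ g2)) (g3 ++ (g4 ++ (g5 ++ (g6 ++ (g7 ++ (g8 ++ g9))))))
      (g10 ++ g11) (g0.length + g1.length + g2.length)
      (g0.length + g1.length + g2.length + (g3.length + g4.length + g5.length + g6.length
        + g7.length + g8.length + g9.length))
      (by rw [hT]; simp [List.append_assoc]) (by simp only [List.length_append]; try omega)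
      (by simp only [List.length_append]; try omega)
  have s5 : PySem.List.slice T
      (some ((g0.length + g1.length + g2.length + (g3.length + g4.length + g5.length
        + g6.length + g7.length + g8.length + g9.length) : Nat) : Int))
      (some (((g0.length + g1.length + g2.length + (g3.length + g4.length + g5.length
        + g6.length + g7.length + g8.length + g9.length) + g10.length : Nat)) : Int))
      = g10 :=
    gcf_slice_spec T (g0 ++ (g1 ++ (g2 ++ (g3 ++ (g4 ++ (g5 ++ (g6 ++ (g7 ++
      (g8 ++ g9))))))))) g10 g11
      (g0.length + g1.length + g2.length + (g3.length + g4.length + g5.length + g6.length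
        + g7.length + g8.length + g9.length))
      (g0.length + g1.length + g2.length + (g3.length + g4.length + g5.length + g6.length
        + g7.length + g8.length + g9.length) + g10.length)
      (by rw [hT]; simp [List.append_assoc]) (by simp only [List.length_append]; try omega)
      (by simp only [List.length_append]; try omega)
  have s6 : PySem.List.slice T
      (some ((g0.length + g1.length + g2.length + (g3.length + g4.length + g5.length
        + g6.length + g7.length + g8.length + g9.length) + g10.length : Nat) : Int))
      (some (((g0.length + g1.length + g2.length + (g3.length + g4.length + g5.length
        + g6.length + g7.length + g8.length + g9.length) + g10.length + g11.length : Nat)) : Int))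
      = g11 :=
    gcf_slice_spec T (g0 ++ (g1 ++ (g2 ++ (g3 ++ (g4 ++ (g5 ++ (g6 ++ (g7 ++ (g8 ++ (g9 ++
      g10)))))))))) g11 []
      (g0.length + g1.length + g2.length + (g3.length + g4.length + g5.length + g6.length
        + g7.length + g8.length + g9.length) + g10.length)
      (g0.length + g1.length + g2.length + (g3.length + g4.length + g5.length + g6.length
        + g7.length + g8.length + g9.length) + g10.length + g11.length)
      (by rw [hT]; simp [List.append_assoc]) (by simp only [List.length_append]; try omega)
      (by simp only [List.length_append]; try omega)
  simp only [gcfSpecs, gcfLoop, a1, a2, a3, a4, a5, a6, s1, s2, s3, s4, s5, s6,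
    Bool.true_or, Bool.false_or]
  by_cases e10 : g10 = [] <;> by_cases e11 : g11 = [] <;>
    simp [e10, e11, List.isEmpty_iff, List.length_pos_iff.mpr, List.append_assoc,
      Nat.lt_add_right_iff_pos, List.length_pos_iff]

-- ===== VERDICT (by name: the statement is the Claim_ definition above) =====
theorem generate_consolidated_files_spec : Claim_equal_generate_consolidated_files := by
  intro cf _
  unfold Spec_generate_consolidated_files
  simp only [generate_consolidated_files, generate_consolidated_files_alt]
  rw [gcf_sorted_eq, gcf_grouped_explicit]
  rw [gcf_loop_eval _ _ _ _ _ _ _ _ _ _ _ _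
    (gcf_key_G 0 cf) (gcf_key_G 1 cf) (gcf_key_G 2 cf) (gcf_key_G 3 cf)
    (gcf_key_G 4 cf) (gcf_key_G 5 cf) (gcf_key_G 6 cf) (gcf_key_G 7 cf)
    (gcf_key_G 8 cf) (gcf_key_G 9 cf) (gcf_key_G 10 cf) (gcf_key_G 11 cf)]
  by_cases hT : gcfComp "TESTS" cf = [] <;> by_cases hO : gcfComp "OTHER" cf = [] <;>
    simp [hT, hO, gcfJoin, gcfG, gcfCat, List.map_map, List.map_append, List.append_assoc,
      List.isEmpty_iff, Function.comp]
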